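-- pv_equiv track=rewrite | github.com/jirik/aoc2023 | day21.py | get_steps_from_coord
-- ===== SOURCE A (Python) =====
-- from functools import reduce, lru_cache
--
-- def get_nbs(coord):
--     r, c = coord
--     return {(r + 1, c), (r - 1, c), (r, c - 1), (r, c + 1)}
--
-- def get_steps_from_coord(mp, start_coord):
--     coords = set()
--     hist = []
--     curr_coords = {start_coord}
--     while diff := curr_coords - coords:
--         hist.append(diff)
--         coords |= diff
--         curr_coords = reduce(lambda p, coord: p | {
--             (r, c) for r, c in get_nbs(coord) if 0 <= r < len(mp) and 0 <= c < len(mp[0]) and mp[r][c] != '#'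
--         }, diff, set())
--     return hist
-- ===== SOURCE B (Python) =====
-- def get_steps_from_coord(mp, start_coord):
--     # Single-queue BFS with a distance dict, then bucket cells by distance.
--     dist = {start_coord: 0}
--     queue = [start_coord]
--     i = 0
--     while i < len(queue):
--         r, c = queue[i]
--         i += 1
--         d = dist[(r, c)]
--         for nb in ((r + 1, c), (r - 1, c), (r, c - 1), (r, c + 1)):
--             if nb not in dist and 0 <= nb[0] < len(mp) and 0 <= nb[1] < len(mp[0]) and mp[nb[0]][nb[1]] != '#':
--                 dist[nb] = d + 1
--                 queue.append(nb)
--     m = max(dist.values())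
--     return [{coord for coord, dd in dist.items() if dd == d} for d in range(m + 1)]
-- ===== Notes on version B (the rewrite author's own statement) =====
-- stated objective: idiomatic
-- what changed: Replaces A's layer-by-layer set algebra (reduce of set unions of all neighbours, then set difference against the visited set each round) by the textbook single-queue BFS that pops one cell at a time, records each cell's distance in a dict at first discovery, and finally buckets the dict's cells by distance to rebuild the layers.
-- outside the precondition, e.g. on get_steps_from_coord(['..', '##', '.'], (0, 0)): A returns [{(0, 0)}, {(0, 1)}], B returns [{(0, 0)}, {(0, 1)}]
import Mathlib
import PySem

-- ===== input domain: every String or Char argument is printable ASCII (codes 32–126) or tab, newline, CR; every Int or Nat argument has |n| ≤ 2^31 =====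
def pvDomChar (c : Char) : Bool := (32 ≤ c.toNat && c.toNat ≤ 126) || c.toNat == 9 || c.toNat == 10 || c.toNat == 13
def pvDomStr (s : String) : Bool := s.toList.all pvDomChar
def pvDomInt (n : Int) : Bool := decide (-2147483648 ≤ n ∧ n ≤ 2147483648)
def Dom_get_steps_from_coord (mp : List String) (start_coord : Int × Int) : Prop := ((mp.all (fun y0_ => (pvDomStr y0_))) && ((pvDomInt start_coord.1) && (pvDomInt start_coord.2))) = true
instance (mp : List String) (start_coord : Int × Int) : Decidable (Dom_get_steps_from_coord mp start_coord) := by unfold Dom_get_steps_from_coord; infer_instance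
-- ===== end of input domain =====

-- B replaces A's per-layer set algebra by the textbook single-queue BFS with a distance dict,
-- bucketing cells by distance at the end (objective: idiomatic; same return value on Pre_ inputs).

-- ===== PORT A =====
def get_nbs (coord : Int × Int) : PySem.Set (Int × Int) :=
  PySem.Set.ofList [(coord.1 + 1, coord.2), (coord.1 - 1, coord.2), (coord.1, coord.2 - 1), (coord.1, coord.2 + 1)]

-- the test '0 <= r < len(mp) and 0 <= c < len(mp[0]) and mp[r][c] != '#'' (textually identical in both
-- Pythons, so shared by both ports); the char lookup is pyGet?: 'none' is exactly where Python raises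
-- IndexError (a ragged map reached at a short row) — those inputs are excluded by Pre_ below.
def pvOk (mp : List String) (rc : Int × Int) : Bool :=
  decide (0 ≤ rc.1) && decide (rc.1 < PySem.List.len mp) && decide (0 ≤ rc.2) &&
  decide (rc.2 < PySem.Str.len (mp.headD "")) &&
  (((PySem.List.pyGet? mp rc.1).bind (fun row => PySem.Str.pyGet? row rc.2)) != some '#')

-- 'reduce(lambda p, coord: p | {(r, c) for r, c in get_nbs(coord) if …}, diff, set())'
def pvCurrStep (mp : List String) (diff : List (Int × Int)) : PySem.Set (Int × Int) :=
  diff.foldl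
    (fun p coord => PySem.Set.union p (PySem.Set.ofList ((get_nbs coord).filter (fun rc => pvOk mp rc))))
    PySem.Set.empty

-- the 'while diff := curr_coords - coords:' loop; fuel (rows*cols+2) is a totality guard only: the loop
-- adds at least one fresh cell of the grid per iteration, so the guard is never the reason it stops
def pvLoopA (mp : List String) (fuel : Nat) (coords : PySem.Set (Int × Int))
    (hist : List (List (Int × Int))) (curr : PySem.Set (Int × Int)) : List (List (Int × Int)) :=
  match fuel with
  | 0 => hist
  | fuel + 1 =>
    let diff := PySem.Set.diff curr coords
    if diff = [] then hist
    else pvLoopA mp fuel (PySem.Set.union coords diff) (hist ++ [diff]) (pvCurrStep mp diff)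

def get_steps_from_coord (mp : List String) (start_coord : Int × Int) : List (List (Int × Int)) :=
  pvLoopA mp (mp.length * (mp.headD "").toList.length + 2) PySem.Set.empty [] (PySem.Set.ofList [start_coord])

-- ===== PORT B =====
-- '((r + 1, c), (r - 1, c), (r, c - 1), (r, c + 1))' of Source B
def pvNbs4 (rc : Int × Int) : List (Int × Int) :=
  [(rc.1 + 1, rc.2), (rc.1 - 1, rc.2), (rc.1, rc.2 - 1), (rc.1, rc.2 + 1)]

-- Source B's queue loop: pop the front cell, append the fresh valid neighbours with distance d+1;
-- fuel (rows*cols+2) is a totality guard only (each pop was a distinct enqueued cell)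
def pvBfs (mp : List String) (fuel : Nat) (dist : PySem.Dict (Int × Int) Int)
    (queue : List (Int × Int)) : PySem.Dict (Int × Int) Int :=
  match fuel, queue with
  | 0, _ => dist
  | _ + 1, [] => dist
  | fuel + 1, u :: rest =>
    let d := dist.getD u 0
    let st := (pvNbs4 u).foldl
      (fun (st : PySem.Dict (Int × Int) Int × List (Int × Int)) nb =>
        if !st.1.contains nb && pvOk mp nb then (st.1.insert nb (d + 1), st.2 ++ [nb]) else st)
      (dist, [])
    pvBfs mp fuel st.1 (rest ++ st.2)

def get_steps_from_coord_alt (mp : List String) (start_coord : Int × Int) : List (List (Int × Int)) :=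
  let dist := pvBfs mp (mp.length * (mp.headD "").toList.length + 2)
      (PySem.Dict.insert PySem.Dict.empty start_coord 0) [start_coord]
  let m := (PySem.List.max? dist.values (fun v => v)).getD 0
  (PySem.List.pyRange 0 (m + 1) 1).map
    (fun d => PySem.Set.ofList ((dist.items.filter (fun p => p.2 == d)).map (fun p => p.1)))

-- ===== PRECONDITION & SPEC =====
-- Pre_ excludes ragged maps (a row shorter than row 0) except when the start cell is isolated (no
-- neighbour in bounds, so no row is ever indexed): on a ragged map Python A can raise IndexError on
-- mp[r][c]; on excluded ragged maps whose short rows happen never to be probed A still returns, and B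
-- returns the same value (see cites). (Both Lean ports model the raising lookup mp[r][c] through the
-- same total pyGet? helper, so the equivalence theorem itself holds without using Pre_; Pre_'s role is
-- to keep the Python-raising inputs outside the claim.)
def Pre_get_steps_from_coord (mp : List String) (start_coord : Int × Int) : Prop :=
  (∀ s ∈ mp, PySem.Str.len (mp.headD "") ≤ PySem.Str.len s) ∨
  (∀ rc ∈ [(start_coord.1 + 1, start_coord.2), (start_coord.1 - 1, start_coord.2),
      (start_coord.1, start_coord.2 - 1), (start_coord.1, start_coord.2 + 1)],
    ¬ (0 ≤ rc.1 ∧ rc.1 < (mp.length : Int) ∧ 0 ≤ rc.2 ∧ rc.2 < PySem.Str.len (mp.headD "")))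
instance (mp : List String) (start_coord : Int × Int) : Decidable (Pre_get_steps_from_coord mp start_coord) := by
  unfold Pre_get_steps_from_coord; infer_instance

def pvWitness_get_steps_from_coord : List String × (Int × Int) := ([".#", ".."], (0, 0))

def Spec_get_steps_from_coord (mp : List String) (start_coord : Int × Int) (out : List (List (Int × Int))) : Prop := out = get_steps_from_coord_alt mp start_coord
instance (mp : List String) (start_coord : Int × Int) (out : List (List (Int × Int))) : Decidable (Spec_get_steps_from_coord mp start_coord out) := by unfold Spec_get_steps_from_coord; infer_instance

-- ===== CLAIM (what is proved, stated in full; the proofs are below) =====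
def Claim_equal_get_steps_from_coord : Prop := ∀ (mp : List String) (start_coord : Int × Int), Dom_get_steps_from_coord mp start_coord → Pre_get_steps_from_coord mp start_coord → Spec_get_steps_from_coord mp start_coord (get_steps_from_coord mp start_coord)

-- ===== LEMMAS AND PROOFS =====

-- ---- generic helpers ----

theorem pv_contains_filter (l : List (Int × Int)) (p : (Int × Int) → Bool) (a : Int × Int) :
    (l.filter p).contains a = (l.contains a && p a) := by
  by_cases h : a ∈ l
  · by_cases hp : p a = true <;>
      simp [List.contains_eq_mem, List.mem_filter, h, hp]
  · simp [List.contains_eq_mem, List.mem_filter, h]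

theorem pv_nbs_nodup (rc : Int × Int) : (pvNbs4 rc).Nodup := by
  simp [pvNbs4, Prod.ext_iff]
  omega

theorem pv_get_nbs_eq (rc : Int × Int) : get_nbs rc = pvNbs4 rc := by
  have h := pv_nbs_nodup rc
  simp only [pvNbs4] at h
  simp only [get_nbs, pvNbs4]
  exact PySem.Set.ofList_eq_self_of_nodup _ h

-- the sequential frontier-expansion both programs compute: for each frontier cell in order,
-- its valid not-yet-seen neighbours, in discovery order
def pvNext (mp : List String) (seen : List (Int × Int)) : List (Int × Int) → List (Int × Int)
  | [] => []
  | u :: rest =>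
    let ns := (pvNbs4 u).filter (fun v => !seen.contains v && pvOk mp v)
    ns ++ pvNext mp (seen ++ ns) rest

theorem pvNext_congr (mp : List String) : ∀ (fr s1 s2 : List (Int × Int)),
    (∀ v, s1.contains v = s2.contains v) → pvNext mp s1 fr = pvNext mp s2 fr := by
  intro fr
  induction fr with
  | nil => intro _ _ _; rfl
  | cons u rest ih =>
    intro s1 s2 h
    simp only [pvNext]
    have hns : (pvNbs4 u).filter (fun v => !s1.contains v && pvOk mp v)
        = (pvNbs4 u).filter (fun v => !s2.contains v && pvOk mp v) := by
      apply List.filter_congr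
      intro v _
      rw [h v]
    rw [hns]
    congr 1
    apply ih
    intro v
    have hv := h v
    simp only [List.contains_eq_mem] at hv
    simp [List.contains_eq_mem, hv]

theorem pvNext_valid (mp : List String) : ∀ (fr seen : List (Int × Int)) (v : Int × Int),
    v ∈ pvNext mp seen fr → pvOk mp v = true := by
  intro fr
  induction fr with
  | nil => intro _ _ h; simp [pvNext] at h
  | cons u rest ih =>
    intro seen v hv
    simp only [pvNext, List.mem_append] at hv
    rcases hv with hv | hv
    · exact (List.mem_filter.mp hv).2 |> fun h => by
        simp only [Bool.and_eq_true] at h; exact h.2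
    · exact ih _ _ hv

theorem pvNext_append_nodup (mp : List String) : ∀ (fr seen : List (Int × Int)),
    seen.Nodup → (seen ++ pvNext mp seen fr).Nodup := by
  intro fr
  induction fr with
  | nil => intro seen h; simpa [pvNext] using h
  | cons u rest ih =>
    intro seen h
    simp only [pvNext]
    rw [← List.append_assoc]
    apply ih
    apply List.Nodup.append h ((pv_nbs_nodup u).filter _)
    intro v hv hv'
    have := (List.mem_filter.mp hv').2
    simp only [Bool.and_eq_true, Bool.not_eq_true'] at this
    rw [List.contains_eq_mem] at this
    simp [hv] at this

-- ---- A-side: the loop equals layer recursion ----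

def pvLayers (mp : List String) : Nat → List (Int × Int) → List (Int × Int) → List (List (Int × Int))
  | 0, _, _ => []
  | fuel + 1, seen, fr =>
    if fr = [] then []
    else fr :: pvLayers mp fuel (seen ++ fr) (pvNext mp (seen ++ fr) fr)

theorem pvLayers_props (mp : List String) : ∀ (f : Nat) (seen fr : List (Int × Int)),
    (seen ++ fr).Nodup → ∀ ℓ ∈ pvLayers mp f seen fr, ℓ.Nodup ∧ ℓ ≠ [] := by
  intro f
  induction f with
  | zero => intro seen fr _ ℓ h; simp [pvLayers] at h
  | succ f ih =>
    intro seen fr h ℓ hℓ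
    simp only [pvLayers] at hℓ
    by_cases hfr : fr = []
    · simp [hfr] at hℓ
    · rw [if_neg hfr] at hℓ
      rcases List.mem_cons.mp hℓ with rfl | hℓ
      · exact ⟨h.of_append_right, hfr⟩
      · exact ih (seen ++ fr) _ (by simpa using pvNext_append_nodup mp fr (seen ++ fr) h) ℓ hℓ

theorem pv_FU (mp : List String) : ∀ (fr : List (Int × Int)) (acc S : List (Int × Int)),
    PySem.Set.diff
      (fr.foldl (fun p coord =>
        PySem.Set.union p (PySem.Set.ofList ((get_nbs coord).filter (fun rc => pvOk mp rc)))) acc) S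
    = PySem.Set.diff acc S ++ pvNext mp (S ++ PySem.Set.diff acc S) fr := by
  intro fr
  induction fr with
  | nil => intro acc S; simp [pvNext]
  | cons u rest ih =>
    intro acc S
    simp only [List.foldl_cons]
    rw [ih]
    have hvn : ((get_nbs u).filter (fun rc => pvOk mp rc)).Nodup := by
      rw [pv_get_nbs_eq]; exact (pv_nbs_nodup u).filter _
    have hacc' : PySem.Set.union acc (PySem.Set.ofList ((get_nbs u).filter (fun rc => pvOk mp rc)))
        = acc ++ ((get_nbs u).filter (fun rc => pvOk mp rc)).filter (fun y => !acc.contains y) := by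
      show PySem.Set.update acc _ = _
      rw [PySem.Set.update_eq_append_filter]
      rw [PySem.Set.ofList_ofList]
      rw [PySem.Set.ofList_eq_self_of_nodup _ hvn]
      rfl
    rw [hacc']
    have hdiff : PySem.Set.diff
        (acc ++ ((get_nbs u).filter (fun rc => pvOk mp rc)).filter (fun y => !acc.contains y)) S
        = PySem.Set.diff acc S
          ++ (pvNbs4 u).filter (fun v => !(S ++ PySem.Set.diff acc S).contains v && pvOk mp v) := by
      show List.filter _ _ = _
      rw [List.filter_append]
      congr 1
      rw [pv_get_nbs_eq, List.filter_filter, List.filter_filter]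
      apply List.filter_congr
      intro v _
      simp only [PySem.Set.diff, List.contains_append, pv_contains_filter, Bool.not_or,
        Bool.not_and, Bool.not_not, List.contains_eq_mem]
      by_cases hS : v ∈ S <;> by_cases hA : v ∈ acc <;> simp [hS, hA]
    rw [hdiff]
    simp only [pvNext]
    rw [List.append_assoc]
    congr 1
    congr 1
    apply pvNext_congr
    intro v
    simp [List.contains_append]

theorem pvCurrStep_nodup (mp : List String) (diff : List (Int × Int)) : (pvCurrStep mp diff).Nodup := by
  unfold pvCurrStep
  induction diff using List.reverseRecOn with
  | nil => simp [PySem.Set.empty]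
  | append_singleton rest u ih =>
    rw [List.foldl_append]
    exact PySem.Set.nodup_update _ _ ih

theorem pvLoopA_eq (mp : List String) : ∀ (fuel : Nat) (coords curr : PySem.Set (Int × Int))
    (hist : List (List (Int × Int))), curr.Nodup →
    pvLoopA mp fuel coords hist curr = hist ++ pvLayers mp fuel coords (PySem.Set.diff curr coords) := by
  intro fuel
  induction fuel with
  | zero => intro coords curr hist _; simp [pvLoopA, pvLayers]
  | succ fuel ih =>
    intro coords curr hist hnd
    rw [pvLoopA, pvLayers]
    by_cases hdiff : PySem.Set.diff curr coords = []
    · simp [hdiff]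
    · rw [if_neg hdiff, if_neg hdiff]
      have hdnd : (PySem.Set.diff curr coords).Nodup := hnd.filter _
      have hfresh : ∀ v ∈ PySem.Set.diff curr coords, v ∉ coords := by
        intro v hv
        have := (List.mem_filter.mp hv).2
        simpa [List.contains_eq_mem] using this
      have hunion : PySem.Set.union coords (PySem.Set.diff curr coords)
          = coords ++ PySem.Set.diff curr coords := by
        show PySem.Set.update _ _ = _
        exact PySem.Set.update_eq_append_of_disjoint _ _ hdnd hfresh
      rw [ih _ _ _ (pvCurrStep_nodup mp _)]
      rw [hunion]
      have : PySem.Set.diff (pvCurrStep mp (PySem.Set.diff curr coords))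
            (coords ++ PySem.Set.diff curr coords)
          = pvNext mp (coords ++ PySem.Set.diff curr coords) (PySem.Set.diff curr coords) := by
        have h := pv_FU mp (PySem.Set.diff curr coords) PySem.Set.empty
          (coords ++ PySem.Set.diff curr coords)
        unfold pvCurrStep
        rw [h]
        simp [PySem.Set.diff, PySem.Set.empty]
      rw [this]
      simp

-- ---- B-side: the queue BFS fills the dict layer block by layer block ----

def pvDistApp (d : PySem.Dict (Int × Int) Int) (l : List (Int × Int)) (k : Int) :
    PySem.Dict (Int × Int) Int :=
  PySem.Dict.mk (d.items ++ l.map (fun v => (v, k)))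

theorem pvDistApp_nil (d : PySem.Dict (Int × Int) Int) (k : Int) : pvDistApp d [] k = d := by
  cases d; simp [pvDistApp]

theorem pv_keys_distApp (d : PySem.Dict (Int × Int) Int) (l : List (Int × Int)) (k : Int) :
    (pvDistApp d l k).keys = d.keys ++ l := by
  cases d
  simp [pvDistApp, PySem.Dict.keys, Function.comp_def]

theorem pv_contains_distApp (d : PySem.Dict (Int × Int) Int) (l : List (Int × Int)) (k : Int)
    (v : Int × Int) : (pvDistApp d l k).contains v = (d.contains v || l.contains v) := by
  cases d with
  | mk items =>
    simp only [pvDistApp, PySem.Dict.contains, List.any_append]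
    congr 1
    simp only [List.any_map, Function.comp_def, List.contains_eq_mem]
    by_cases h : v ∈ l
    · have hany : l.any (fun x => (x, k).1 == v) = true :=
        List.any_eq_true.mpr ⟨v, h, by simp⟩
      simp [h, hany]
    · have hany : l.any (fun x => (x, k).1 == v) = false := by
        rw [List.any_eq_false]
        intro x hx
        simp only [beq_iff_eq]
        intro hxv
        exact h (hxv ▸ hx)
      simp [h, hany]

theorem pv_get?_distApp_left (d : PySem.Dict (Int × Int) Int) (l : List (Int × Int)) (j k : Int)
    (u : Int × Int) (h : d.get? u = some k) : (pvDistApp d l j).get? u = some k := by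
  cases d with
  | mk items =>
    simp only [PySem.Dict.get?, pvDistApp] at h ⊢
    rw [List.find?_append]
    rcases hfind : List.find? (fun p => p.1 == u) items with _ | p
    · rw [hfind] at h; simp at h
    · rw [hfind] at h ⊢
      simpa using h

theorem pv_find_mapped (l : List (Int × Int)) (j : Int) (u : Int × Int) (hu : u ∈ l) :
    Option.map (fun x : (Int × Int) × Int => x.2)
      (List.find? (fun p => p.1 == u) (l.map (fun v => (v, j)))) = some j := by
  induction l with
  | nil => simp at hu
  | cons x xs ih =>
    by_cases hx : x = u
    · subst hx
      simp
    · have hbeq : ((x, j).1 == u) = false := by simp [hx]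
      simp only [List.map_cons, List.find?_cons, hbeq]
      apply ih
      rcases List.mem_cons.mp hu with rfl | h
      · exact absurd rfl hx
      · exact h

theorem pv_get?_distApp_right (d : PySem.Dict (Int × Int) Int) (l : List (Int × Int)) (j : Int)
    (u : Int × Int) (h : d.get? u = none) (hu : u ∈ l) : (pvDistApp d l j).get? u = some j := by
  cases d with
  | mk items =>
    simp only [PySem.Dict.get?, pvDistApp] at h ⊢
    rw [List.find?_append]
    rcases hfind : List.find? (fun p => p.1 == u) items with _ | p
    · rw [hfind]
      exact pv_find_mapped l j u hu
    · rw [hfind] at h; simp at h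

theorem pv_bstep (mp : List String) (w : Int) : ∀ (nbs : List (Int × Int)), nbs.Nodup →
    ∀ (dist : PySem.Dict (Int × Int) Int) (out : List (Int × Int)),
    nbs.foldl
      (fun (st : PySem.Dict (Int × Int) Int × List (Int × Int)) nb =>
        if !st.1.contains nb && pvOk mp nb then (st.1.insert nb w, st.2 ++ [nb]) else st)
      (dist, out)
    = (pvDistApp dist (nbs.filter (fun v => !dist.contains v && pvOk mp v)) w,
       out ++ nbs.filter (fun v => !dist.contains v && pvOk mp v)) := by
  intro nbs
  induction nbs with
  | nil => intro _ dist out; simp [pvDistApp_nil]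
  | cons nb rest ih =>
    intro hnd dist out
    simp only [List.foldl_cons, List.filter_cons]
    by_cases hc : (!dist.contains nb && pvOk mp nb) = true
    · rw [if_pos hc]
      have hnc : dist.contains nb = false := by
        simp only [Bool.and_eq_true, Bool.not_eq_true'] at hc; exact hc.1
      have hins : dist.insert nb w = pvDistApp dist [nb] w := by
        cases dist with
        | mk items =>
          simp only [PySem.Dict.insert, pvDistApp]
          rw [if_neg (by simp [hnc])]
          simp
      rw [hins, ih (hnd.of_cons) (pvDistApp dist [nb] w) (out ++ [nb])]
      have hfc : rest.filter (fun v => !(pvDistApp dist [nb] w).contains v && pvOk mp v)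
          = rest.filter (fun v => !dist.contains v && pvOk mp v) := by
        apply List.filter_congr
        intro v hv
        have hvne : v ≠ nb := by
          intro h; subst h
          exact (List.nodup_cons.mp hnd).1 hv
        rw [pv_contains_distApp]
        simp [List.contains_eq_mem, hvne]
      rw [hfc]
      have h1 : pvDistApp (pvDistApp dist [nb] w)
            (rest.filter (fun v => !dist.contains v && pvOk mp v)) w
          = pvDistApp dist (nb :: rest.filter (fun v => !dist.contains v && pvOk mp v)) w := by
        cases dist
        simp [pvDistApp]
      rw [h1]
      have hok : pvOk mp nb = true := by
        simp only [Bool.and_eq_true] at hc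
        exact hc.2
      simp [hnc, hok]
    · rw [if_neg hc, ih (hnd.of_cons) dist out]
      rw [Bool.not_eq_true] at hc
      simp [hc]

theorem pvBfs_nil (mp : List String) (fuel : Nat) (dist : PySem.Dict (Int × Int) Int) :
    pvBfs mp fuel dist [] = dist := by
  cases fuel <;> rfl

theorem pv_bfs_block (mp : List String) : ∀ (fr : List (Int × Int)) (fuelB : Nat)
    (dist : PySem.Dict (Int × Int) Int) (nx : List (Int × Int)) (k : Int),
    fr.length ≤ fuelB →
    (∀ u ∈ fr, dist.get? u = some k) →
    pvBfs mp fuelB dist (fr ++ nx)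
      = pvBfs mp (fuelB - fr.length) (pvDistApp dist (pvNext mp dist.keys fr) (k + 1))
          (nx ++ pvNext mp dist.keys fr) := by
  intro fr
  induction fr with
  | nil =>
    intro fuelB dist nx k _ _
    simp [pvNext, pvDistApp_nil]
  | cons u fr' ih =>
    intro fuelB dist nx k hfuel hval
    cases fuelB with
    | zero => simp at hfuel
    | succ f =>
      have hd : dist.getD u 0 = k := by
        rw [PySem.Dict.getD_eq_get?_getD, hval u (by simp)]
        rfl
      rw [List.cons_append, pvBfs]
      simp only [hd]
      rw [pv_bstep mp (k + 1) (pvNbs4 u) (pv_nbs_nodup u) dist []]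
      have hkeys : ∀ v, dist.contains v = dist.keys.contains v := by
        intro v
        cases dist with
        | mk items =>
          simp only [PySem.Dict.contains, PySem.Dict.keys, List.contains_eq_mem, List.any_eq_true,
            List.mem_map]
          by_cases h : ∃ p ∈ items, p.1 = v
          · rcases h with ⟨p, hp, hpv⟩
            have h1 : items.any (fun p => p.1 == v) = true :=
              List.any_eq_true.mpr ⟨p, hp, by simp [hpv]⟩
            rw [h1]
            symm
            simp only [decide_eq_true_eq]
            exact ⟨p, hp, hpv⟩
          · have h1 : items.any (fun p => p.1 == v) = false := by
              rw [List.any_eq_false]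
              intro p hp
              simp only [beq_iff_eq]
              exact fun hpv => h ⟨p, hp, hpv⟩
            rw [h1]
            symm
            simp only [decide_eq_false_iff_not]
            intro ⟨p, hp, hpv⟩
            exact h ⟨p, hp, hpv⟩
      have hns : (pvNbs4 u).filter (fun v => !dist.contains v && pvOk mp v)
          = (pvNbs4 u).filter (fun v => !dist.keys.contains v && pvOk mp v) := by
        apply List.filter_congr
        intro v _
        rw [hkeys]
      simp only [hns]
      set ns := (pvNbs4 u).filter (fun v => !dist.keys.contains v && pvOk mp v) with hns_def
      have hq : fr' ++ nx ++ ([] ++ ns) = fr' ++ (nx ++ ns) := by simp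
      rw [hq]
      rw [ih f (pvDistApp dist ns (k + 1)) (nx ++ ns) k
        (by simp only [List.length_cons] at hfuel; omega)
        (fun u' hu' => pv_get?_distApp_left _ _ _ _ _ (hval u' (by simp [hu'])))]
      have hkeys' : (pvDistApp dist ns (k + 1)).keys = dist.keys ++ ns := pv_keys_distApp _ _ _
      rw [hkeys']
      have happ : pvDistApp (pvDistApp dist ns (k + 1)) (pvNext mp (dist.keys ++ ns) fr') (k + 1)
          = pvDistApp dist (ns ++ pvNext mp (dist.keys ++ ns) fr') (k + 1) := by
        cases dist
        simp [pvDistApp]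
      rw [happ]
      have hlen : f + 1 - (fr'.length + 1) = f - fr'.length := by omega
      have hnext : pvNext mp dist.keys (u :: fr') = ns ++ pvNext mp (dist.keys ++ ns) fr' := by
        rw [pvNext]
      rw [hnext]
      simp only [List.length_cons, hlen, List.append_assoc]

-- grid size and the counting bound
def pvGridN (mp : List String) : Nat := mp.length * (mp.headD "").toList.length

theorem pv_length_le_grid (mp : List String) (l : List (Int × Int)) (hnd : l.Nodup)
    (hok : ∀ v ∈ l, pvOk mp v = true) : l.length ≤ pvGridN mp := by
  classical
  have hsub : l.toFinset ⊆
      (Finset.Ico (0 : Int) (mp.length : Int)) ×ˢ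
        (Finset.Ico (0 : Int) ((mp.headD "").toList.length : Int)) := by
    intro v hv
    have h := hok v (List.mem_toFinset.mp hv)
    simp only [pvOk, Bool.and_eq_true, decide_eq_true_eq, PySem.List.len, PySem.Str.len] at h
    simp only [Finset.mem_product, Finset.mem_Ico]
    exact ⟨⟨h.1.1.1.1, h.1.1.1.2⟩, ⟨h.1.1.2, h.1.2⟩⟩
  have hcard := Finset.card_le_card hsub
  rw [List.toFinset_card_of_nodup hnd] at hcard
  rw [Finset.card_product] at hcard
  rw [Int.card_Ico, Int.card_Ico] at hcard
  simpa [pvGridN] using hcard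

def pvExt : PySem.Dict (Int × Int) Int → Int → List (List (Int × Int)) → PySem.Dict (Int × Int) Int
  | d, _, [] => d
  | d, k, L :: Ls => pvExt (pvDistApp d L k) (k + 1) Ls

theorem pv_bfs_layers (mp : List String) : ∀ (f : Nat) (fuelB : Nat)
    (dist : PySem.Dict (Int × Int) Int) (seen fr : List (Int × Int)) (k : Int),
    dist.keys = seen ++ fr →
    fr ≠ [] →
    dist.keys.Nodup →
    (∀ u ∈ fr, dist.get? u = some k) →
    pvGridN mp + 1 + fr.length ≤ fuelB + (dist.keys.filter (fun v => pvOk mp v)).length →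
    pvGridN mp + 1 ≤ f + (dist.keys.filter (fun v => pvOk mp v)).length →
    pvBfs mp fuelB dist fr = pvExt dist (k + 1) (pvLayers mp f seen fr).tail := by
  intro f
  induction f with
  | zero =>
    intro fuelB dist seen fr k _ _ hnd _ _ hf
    exfalso
    have hsv : (dist.keys.filter (fun v => pvOk mp v)).length ≤ pvGridN mp :=
      pv_length_le_grid mp _ (hnd.filter _) (fun v hv => (List.mem_filter.mp hv).2)
    omega
  | succ f ih =>
    intro fuelB dist seen fr k hkeys hfr hnd hval hfB hf
    have hsv : (dist.keys.filter (fun v => pvOk mp v)).length ≤ pvGridN mp :=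
      pv_length_le_grid mp _ (hnd.filter _) (fun v hv => (List.mem_filter.mp hv).2)
    have hfrfuel : fr.length ≤ fuelB := by omega
    have hblock := pv_bfs_block mp fr fuelB dist [] k hfrfuel hval
    rw [List.append_nil] at hblock
    simp only [List.nil_append] at hblock
    set ns := pvNext mp dist.keys fr with hns_def
    have hlayers : pvLayers mp (f + 1) seen fr
        = fr :: pvLayers mp f (seen ++ fr) (pvNext mp (seen ++ fr) fr) := by
      rw [pvLayers, if_neg hfr]
    have hnseq : pvNext mp (seen ++ fr) fr = ns := by rw [hns_def, hkeys]
    rw [hlayers, hnseq, List.tail_cons]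
    by_cases hns : ns = []
    · rw [hblock, hns, pvBfs_nil, pvDistApp_nil]
      cases f with
      | zero => simp [pvLayers, pvExt]
      | succ f' => rw [pvLayers, if_pos rfl]; rfl
    · -- ns nonempty: continue with the next layer
      have hknd' : (dist.keys ++ ns).Nodup := by
        rw [hns_def]
        exact pvNext_append_nodup mp fr dist.keys hnd
      have hnsvalid : ∀ v ∈ ns, pvOk mp v = true := fun v hv => pvNext_valid mp fr dist.keys v hv
      have hnsfresh : List.Disjoint dist.keys ns := List.disjoint_of_nodup_append hknd'
      have hval' : ∀ u ∈ ns, (pvDistApp dist ns (k + 1)).get? u = some (k + 1) := by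
        intro u hu
        apply pv_get?_distApp_right
        · rw [PySem.Dict.get?_eq_none_iff_not_mem_keys]
          exact fun h => hnsfresh h hu
        · exact hu
      have hnsval : ns.filter (fun v => pvOk mp v) = ns :=
        List.filter_eq_self.mpr (fun v hv => pvNext_valid mp fr dist.keys v hv)
      have hsv' : ((pvDistApp dist ns (k + 1)).keys.filter (fun v => pvOk mp v)).length
          = (dist.keys.filter (fun v => pvOk mp v)).length + ns.length := by
        rw [pv_keys_distApp, List.filter_append, List.length_append, hnsval]
      have hnslen : 1 ≤ ns.length := by
        cases hnse : ns with
        | nil => exact absurd hnse hns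
        | cons a l => simp
      -- expose the head of the next pvLayers level
      cases f with
      | zero =>
        exfalso
        have hknd'' : ((pvDistApp dist ns (k + 1)).keys.filter (fun v => pvOk mp v)).Nodup := by
          rw [pv_keys_distApp]; exact hknd'.filter _
        have hb : ((pvDistApp dist ns (k + 1)).keys.filter (fun v => pvOk mp v)).length ≤ pvGridN mp :=
          pv_length_le_grid mp _ hknd'' (fun v hv => (List.mem_filter.mp hv).2)
        omega
      | succ f' =>
        have hlay2 : pvLayers mp (f' + 1) (seen ++ fr) ns
            = ns :: pvLayers mp f' ((seen ++ fr) ++ ns) (pvNext mp ((seen ++ fr) ++ ns) ns) := by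
          rw [pvLayers, if_neg hns]
        rw [hblock, hlay2]
        show pvBfs mp (fuelB - fr.length) (pvDistApp dist ns (k + 1)) ns
            = pvExt (pvDistApp dist ns (k + 1)) (k + 1 + 1) (pvLayers mp f' ((seen ++ fr) ++ ns) (pvNext mp ((seen ++ fr) ++ ns) ns))
        have htail : pvLayers mp f' ((seen ++ fr) ++ ns) (pvNext mp ((seen ++ fr) ++ ns) ns)
            = (pvLayers mp (f' + 1) (seen ++ fr) ns).tail := by
          rw [hlay2]
          rfl
        rw [htail]
        apply ih (fuelB - fr.length) (pvDistApp dist ns (k + 1)) (seen ++ fr) ns (k + 1)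
        · rw [pv_keys_distApp, hkeys]
        · exact hns
        · rw [pv_keys_distApp]; exact hknd'
        · exact hval'
        · rw [hsv']; omega
        · rw [hsv']; omega

-- ---- bucketing the final dict by distance ----

def pvItemsOf : List (List (Int × Int)) → Int → List ((Int × Int) × Int)
  | [], _ => []
  | ℓ :: Ls, k => ℓ.map (fun v => (v, k)) ++ pvItemsOf Ls (k + 1)

theorem pv_items_pvExt : ∀ (Ls : List (List (Int × Int))) (d : PySem.Dict (Int × Int) Int) (k : Int),
    (pvExt d k Ls).items = d.items ++ pvItemsOf Ls k := by
  intro Ls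
  induction Ls with
  | nil => intro d k; simp [pvExt, pvItemsOf]
  | cons ℓ Ls ih =>
    intro d k
    rw [pvExt, ih]
    cases d
    simp [pvDistApp, pvItemsOf]

def pvStep (acc : Option Int) (x : Int) : Option Int :=
  match acc with
  | none => some x
  | some m => if m < x then some x else some m

theorem pv_max?_eq (l : List Int) : PySem.List.max? l (fun v => v) = l.foldl pvStep none := by
  rw [PySem.List.max?]
  apply PySem.List.foldl_congr_mem
  intro acc x _
  cases acc <;> rfl

theorem pv_foldl_step_const : ∀ (l : List Int) (m : Int), (∀ x ∈ l, x = m) →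
    l.foldl pvStep (some m) = some m := by
  intro l
  induction l with
  | nil => intro m _; rfl
  | cons x rest ih =>
    intro m h
    have hx : x = m := h x (by simp)
    subst hx
    simp only [List.foldl_cons, pvStep, lt_self_iff_false, if_false]
    exact ih x (fun y hy => h y (by simp [hy]))

theorem pv_foldl_step_from : ∀ (l : List Int) (a m : Int), a ≤ m → l ≠ [] →
    (∀ x ∈ l, x = m) → l.foldl pvStep (some a) = some m := by
  intro l
  cases l with
  | nil => intro a m _ h _; exact absurd rfl h
  | cons x rest =>
    intro a m hle _ h
    have hx : x = m := h x (by simp)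
    subst hx
    simp only [List.foldl_cons, pvStep]
    by_cases hlt : a < x
    · rw [if_pos hlt]
      exact pv_foldl_step_const rest x (fun y hy => h y (by simp [hy]))
    · rw [if_neg hlt]
      have : a = x := le_antisymm hle (not_lt.mp hlt)
      subst this
      exact pv_foldl_step_const rest a (fun y hy => h y (by simp [hy]))

theorem pv_map_snd_block (ℓ : List (Int × Int)) (k : Int) :
    (ℓ.map (fun v => (v, k))).map (fun p : (Int × Int) × Int => p.2) = ℓ.map (fun _ => k) := by
  rw [List.map_map]
  rfl

theorem pv_max_values : ∀ (Ls : List (List (Int × Int))) (k a : Int), a ≤ k →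
    (∀ ℓ ∈ Ls, ℓ ≠ []) → Ls ≠ [] →
    ((pvItemsOf Ls (k + 1)).map (fun p => p.2)).foldl pvStep (some a) = some (k + Ls.length) := by
  intro Ls
  induction Ls with
  | nil => intro k a _ _ h; exact absurd rfl h
  | cons ℓ Ls ih =>
    intro k a hle hne _
    simp only [pvItemsOf, List.map_append, List.foldl_append, pv_map_snd_block]
    have hblock : (ℓ.map (fun _ => k + 1)).foldl pvStep (some a) = some (k + 1) := by
      apply pv_foldl_step_from _ a (k + 1) (by omega)
      · simp [hne ℓ (by simp)]
      · intro x hx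
        rcases List.mem_map.mp hx with ⟨v, _, rfl⟩
        rfl
    rw [hblock]
    by_cases hLs : Ls = []
    · subst hLs
      simp [pvItemsOf]
    · rw [ih (k + 1) (k + 1) le_rfl (fun ℓ' h => hne ℓ' (by simp [h])) hLs]
      congr 1
      simp only [List.length_cons]
      push_cast
      ring

theorem pv_max_top (Ls : List (List (Int × Int))) (hne : Ls ≠ [])
    (hℓ : ∀ ℓ ∈ Ls, ℓ ≠ []) :
    PySem.List.max? ((pvItemsOf Ls 0).map (fun p => p.2)) (fun v => v)
      = some ((Ls.length : Int) - 1) := by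
  rw [pv_max?_eq]
  cases Ls with
  | nil => exact absurd rfl hne
  | cons ℓ Ls =>
    simp only [pvItemsOf, List.map_append, List.foldl_append, pv_map_snd_block]
    have hblock : (ℓ.map (fun _ => (0 : Int))).foldl pvStep none = some 0 := by
      have hlne : ℓ ≠ [] := hℓ ℓ (by simp)
      rcases hl : ℓ with _ | ⟨x, rest⟩
      · exact absurd hl hlne
      · simp only [List.map_cons, List.foldl_cons]
        show (rest.map _).foldl pvStep (some 0) = some 0
        apply pv_foldl_step_const
        intro y hy
        rcases List.mem_map.mp hy with ⟨v, _, rfl⟩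
        rfl
    rw [hblock]
    by_cases hLs : Ls = []
    · subst hLs
      simp [pvItemsOf]
    · rw [pv_max_values Ls 0 0 le_rfl (fun ℓ' h => hℓ ℓ' (by simp [h])) hLs]
      congr 1
      simp only [List.length_cons]
      push_cast
      ring

theorem pv_filter_lt : ∀ (Ls : List (List (Int × Int))) (k d : Int), d < k →
    (pvItemsOf Ls k).filter (fun p => p.2 == d) = [] := by
  intro Ls
  induction Ls with
  | nil => intro k d _; simp [pvItemsOf]
  | cons ℓ Ls ih =>
    intro k d hd
    simp only [pvItemsOf, List.filter_append]
    rw [ih (k + 1) d (by omega)]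
    rw [List.filter_map]
    have : (fun p : (Int × Int) × Int => p.2 == d) ∘ (fun v => (v, k)) = fun _ => false := by
      funext v
      show (k == d) = false
      exact beq_eq_false_iff_ne.mpr (by omega)
    rw [this]
    simp

theorem pv_filter_block : ∀ (Ls : List (List (Int × Int))) (k : Int) (j : Nat) (hj : j < Ls.length),
    (pvItemsOf Ls k).filter (fun p => p.2 == k + (j : Int)) = Ls[j].map (fun v => (v, k + (j : Int))) := by
  intro Ls
  induction Ls with
  | nil => intro k j hj; simp at hj
  | cons ℓ Ls ih =>
    intro k j hj
    cases j with
    | zero =>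
      simp only [Nat.cast_zero, add_zero]
      simp only [pvItemsOf, List.filter_append]
      rw [pv_filter_lt Ls (k + 1) k (by omega)]
      rw [List.filter_map]
      have : (fun p : (Int × Int) × Int => p.2 == k) ∘ (fun v => (v, k)) = fun _ => true := by
        funext v; simp [Function.comp]
      rw [this]
      simp
    | succ j' =>
      simp only [pvItemsOf, List.filter_append]
      have h1 : (ℓ.map (fun v => (v, k))).filter (fun p => p.2 == k + ((j' + 1 : Nat) : Int)) = [] := by
        rw [List.filter_map]
        have : (fun p : (Int × Int) × Int => p.2 == k + ((j' + 1 : Nat) : Int)) ∘ (fun v => (v, k))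
            = fun _ => false := by
          funext v
          show (k == k + ((j' + 1 : Nat) : Int)) = false
          exact beq_eq_false_iff_ne.mpr (by push_cast; omega)
        rw [this]; simp
      rw [h1]
      have h2 : k + ((j' + 1 : Nat) : Int) = (k + 1) + (j' : Int) := by push_cast; ring
      rw [h2, List.nil_append]
      rw [ih (k + 1) j' (by simp only [List.length_cons] at hj; omega)]
      simp

theorem pv_bucket (dist : PySem.Dict (Int × Int) Int) (L : List (List (Int × Int)))
    (hitems : dist.items = pvItemsOf L 0) (hne : L ≠ [])
    (hprops : ∀ ℓ ∈ L, ℓ.Nodup ∧ ℓ ≠ []) :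
    (PySem.List.pyRange 0 (((PySem.List.max? dist.values (fun v => v)).getD 0) + 1) 1).map
      (fun d => PySem.Set.ofList ((dist.items.filter (fun p => p.2 == d)).map (fun p => p.1))) = L := by
  have hvals : dist.values = (pvItemsOf L 0).map (fun p => p.2) := by
    show dist.items.map (fun p => p.2) = _
    rw [hitems]
  rw [hvals, pv_max_top L hne (fun ℓ h => (hprops ℓ h).2)]
  have hm : (some ((L.length : Int) - 1)).getD 0 + 1 = (L.length : Int) := by
    simp
  rw [hm]
  rw [PySem.List.pyRange_one]
  have hlen : ((L.length : Int) - 0).toNat = L.length := by omega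
  rw [hlen]
  rw [List.map_map]
  apply List.ext_getElem
  · simp
  · intro j hj hj2
    simp only [List.getElem_map, List.getElem_range, Function.comp]
    have hjL : j < L.length := by simpa using hj
    have h0 : (0 : Int) + (j : Int) = 0 + (j : Int) := rfl
    rw [hitems, pv_filter_block L 0 j hjL]
    rw [List.map_map]
    have : (fun p : (Int × Int) × Int => p.1) ∘ (fun v => (v, (0 : Int) + (j : Int))) = id := by
      funext v; rfl
    rw [this, List.map_id]
    exact PySem.Set.ofList_eq_self_of_nodup _ (hprops _ (List.getElem_mem hjL)).1

-- ---- assembly ----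

set_option maxHeartbeats 1000000 in
theorem pv_main (mp : List String) (sc : Int × Int) :
    get_steps_from_coord mp sc = get_steps_from_coord_alt mp sc := by
  have hF : mp.length * (mp.headD "").toList.length + 2 = pvGridN mp + 2 := by rw [pvGridN]
  -- A-side: the loop computes the layers
  have hA : get_steps_from_coord mp sc = pvLayers mp (pvGridN mp + 2) [] [sc] := by
    rw [get_steps_from_coord, hF]
    rw [pvLoopA_eq mp _ PySem.Set.empty (PySem.Set.ofList [sc]) [] (PySem.Set.nodup_ofList _)]
    have h1 : PySem.Set.ofList [sc] = [sc] :=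
      PySem.Set.ofList_eq_self_of_nodup _ (List.nodup_singleton sc)
    have h2 : PySem.Set.diff (PySem.Set.ofList [sc]) PySem.Set.empty = [sc] := by
      rw [h1]; simp [PySem.Set.diff, PySem.Set.empty]
    rw [h2]
    simp [PySem.Set.empty]
  set L := pvLayers mp (pvGridN mp + 2) [] [sc] with hL
  have hprops : ∀ ℓ ∈ L, ℓ.Nodup ∧ ℓ ≠ [] := pvLayers_props mp _ [] [sc] (by simp)
  have hhead : L = [sc] :: pvLayers mp (pvGridN mp + 1) ([] ++ [sc]) (pvNext mp ([] ++ [sc]) [sc]) := by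
    rw [hL]
    show pvLayers mp (pvGridN mp + 1 + 1) [] [sc] = _
    rw [pvLayers, if_neg (by simp)]
  have hne : L ≠ [] := by rw [hhead]; simp
  -- B-side: the BFS fills the dict with exactly those layers
  have hkeys0 : (PySem.Dict.insert (PySem.Dict.empty) sc 0).keys = [] ++ [sc] := rfl
  have hbfs := pv_bfs_layers mp (pvGridN mp + 2) (pvGridN mp + 2)
    (PySem.Dict.insert (PySem.Dict.empty) sc 0)
    [] [sc] 0 hkeys0 (by simp)
    (by exact List.nodup_singleton sc)
    (by
      intro u hu
      have : u = sc := by simpa using hu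
      subst this
      simp [PySem.Dict.get?, PySem.Dict.insert, PySem.Dict.empty, PySem.Dict.contains])
    (by simp only [List.length_cons, List.length_nil]; omega)
    (by omega)
  have hitems : (pvBfs mp (pvGridN mp + 2) (PySem.Dict.insert (PySem.Dict.empty) sc 0) [sc]).items
      = pvItemsOf L 0 := by
    rw [hbfs, pv_items_pvExt, ← hL, hhead]
    simp [pvItemsOf, PySem.Dict.insert, PySem.Dict.empty, PySem.Dict.contains]
  have halt : get_steps_from_coord_alt mp sc
      = (PySem.List.pyRange 0
          (((PySem.List.max?
              (pvBfs mp (pvGridN mp + 2) (PySem.Dict.insert (PySem.Dict.empty) sc 0) [sc]).values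
              (fun v => v)).getD 0) + 1) 1).map
        (fun d => PySem.Set.ofList
          (((pvBfs mp (pvGridN mp + 2) (PySem.Dict.insert (PySem.Dict.empty) sc 0) [sc]).items.filter
              (fun p => p.2 == d)).map (fun p => p.1))) := by
    simp only [get_steps_from_coord_alt]
    rw [hF]
  rw [hA, halt]
  exact (pv_bucket _ L hitems hne hprops).symm

-- ===== VERDICT (by name: the statement is the Claim_ definition above) =====
theorem get_steps_from_coord_spec : Claim_equal_get_steps_from_coord := by
  intro mp start_coord _ _
  unfold Spec_get_steps_from_coord
  exact pv_main mp start_coord
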